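-- pv_equiv track=rewrite | github.com/Jahnavi-Analyst/Final_Year_Project | app.py | make_counts
-- ===== SOURCE A (Python) =====
-- def make_counts(items, key):
--     pos = neg = neu = 0
--     for it in items:
--         v = it.get(key, "Neutral")
--         if v == "Positive":
--             pos += 1
--         elif v == "Negative":
--             neg += 1
--         else:
--             neu += 1
--     return {"pos": pos, "neg": neg, "neu": neu}
-- ===== SOURCE B (Python) =====
-- def make_counts(items, key):
--     vals = [it.get(key, "Neutral") for it in items]
--     pos = vals.count("Positive")
--     neg = vals.count("Negative")
--     return {"pos": pos, "neg": neg, "neu": len(vals) - pos - neg}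
-- ===== Notes on version B (the rewrite author's own statement) =====
-- stated objective: idiomatic
-- what changed: Replaces the single branched three-accumulator loop by extracting the value list once and deriving pos/neg with list.count, with neu obtained by subtraction from the length.
import Mathlib
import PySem

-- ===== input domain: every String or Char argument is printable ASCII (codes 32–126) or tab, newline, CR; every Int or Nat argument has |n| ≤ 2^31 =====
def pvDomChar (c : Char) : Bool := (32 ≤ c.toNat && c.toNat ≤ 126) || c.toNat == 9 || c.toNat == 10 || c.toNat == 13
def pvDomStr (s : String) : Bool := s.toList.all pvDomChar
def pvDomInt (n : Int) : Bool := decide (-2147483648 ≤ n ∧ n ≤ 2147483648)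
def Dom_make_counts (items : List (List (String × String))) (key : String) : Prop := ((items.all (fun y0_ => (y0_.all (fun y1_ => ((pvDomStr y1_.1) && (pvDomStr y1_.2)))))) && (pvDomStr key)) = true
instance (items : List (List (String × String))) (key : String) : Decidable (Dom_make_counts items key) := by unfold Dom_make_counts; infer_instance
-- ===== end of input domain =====

-- B (idiomatic): extracts the value list once and derives pos/neg via list.count, neu by subtraction from the length, instead of A's single branched three-accumulator loop.
-- ===== PORT A =====
def make_counts (items : List (List (String × String))) (key : String) : List (String × Int) :=
  let r := items.foldl (fun (s : Int × Int × Int) it =>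
    let v := (PySem.Dict.mk it).getD key "Neutral"
    if v == "Positive" then (s.1 + 1, s.2.1, s.2.2)
    else if v == "Negative" then (s.1, s.2.1 + 1, s.2.2)
    else (s.1, s.2.1, s.2.2 + 1)) (0, 0, 0)
  [("pos", r.1), ("neg", r.2.1), ("neu", r.2.2)]

-- ===== PORT B =====
def make_counts_alt (items : List (List (String × String))) (key : String) : List (String × Int) :=
  let vals := items.map (fun it => (PySem.Dict.mk it).getD key "Neutral")
  let pos : Int := PySem.List.count vals "Positive"
  let neg : Int := PySem.List.count vals "Negative"
  [("pos", pos), ("neg", neg), ("neu", (vals.length : Int) - pos - neg)]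

-- ===== PRECONDITION & SPEC =====
def Spec_make_counts (items : List (List (String × String))) (key : String) (out : List (String × Int)) : Prop := out = make_counts_alt items key
instance (items : List (List (String × String))) (key : String) (out : List (String × Int)) : Decidable (Spec_make_counts items key out) := by unfold Spec_make_counts; infer_instance

-- ===== CLAIM (what is proved, stated in full; the proofs are below) =====
def Claim_equal_make_counts : Prop := ∀ (items : List (List (String × String))) (key : String), Dom_make_counts items key → Spec_make_counts items key (make_counts items key)

-- ===== LEMMAS AND PROOFS =====

-- ===== VERDICT (by name: the statement is the Claim_ definition above) =====
-- Loop invariant: running A's fold from state (p, n, u) adds the Positive count,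
-- the Negative count, and the remainder of the length to the three components.
theorem make_counts_fold (key : String) (items : List (List (String × String)))
    (p n u : Int) :
    items.foldl (fun (s : Int × Int × Int) it =>
      let v := (PySem.Dict.mk it).getD key "Neutral"
      if v == "Positive" then (s.1 + 1, s.2.1, s.2.2)
      else if v == "Negative" then (s.1, s.2.1 + 1, s.2.2)
      else (s.1, s.2.1, s.2.2 + 1)) (p, n, u)
    = (let vals := items.map (fun it => (PySem.Dict.mk it).getD key "Neutral")
       (p + PySem.List.count vals "Positive",
        n + PySem.List.count vals "Negative",
        u + ((vals.length : Int) - PySem.List.count vals "Positive"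
              - PySem.List.count vals "Negative"))) := by
  induction items generalizing p n u with
  | nil => simp [PySem.List.count]
  | cons it rest ih =>
    simp only [List.foldl_cons, List.map_cons]
    by_cases h1 : (PySem.Dict.mk it).getD key "Neutral" = "Positive"
    · rw [ih]
      simp [h1, PySem.List.count]
      omega
    · by_cases h2 : (PySem.Dict.mk it).getD key "Neutral" = "Negative"
      · rw [ih]
        simp [h2, PySem.List.count]
        omega
      · rw [ih]
        simp [h1, h2, PySem.List.count]
        omega

theorem make_counts_spec : Claim_equal_make_counts := by
  intro items key _
  unfold Spec_make_counts make_counts make_counts_alt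
  simp only [make_counts_fold key items 0 0 0]
  simp
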